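-- pv_equiv track=rewrite | github.com/edirent/bicycle-architecture-compiler | pivot_commute_graph.py | symplectic_inner
-- ===== SOURCE A (Python) =====
-- def symplectic_inner(v1, v2):
--     """
--     辛内积:
--       <(x|z),(x'|z')> = x·z' + z·x' mod 2
--     """
--     n2 = len(v1)
--     if len(v2) != n2 or n2 % 2 != 0:
--         raise ValueError("bad symplectic vector lengths")
--
--     n = n2 // 2
--     x1, z1 = v1[:n], v1[n:]
--     x2, z2 = v2[:n], v2[n:]
--
--     s = 0
--     for a, b in zip(x1, z2):
--         s ^= (a & b)
--     for a, b in zip(z1, x2):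
--         s ^= (a & b)
--     return s
-- ===== SOURCE B (Python) =====
-- def symplectic_inner(v1, v2):
--     n2 = len(v1)
--     if len(v2) != n2 or n2 % 2 != 0:
--         raise ValueError("bad symplectic vector lengths")
--     n = n2 // 2
--
--     def xr(lo, hi):
--         # XOR-reduce the per-pair terms for indices lo..hi-1 by recursive halving.
--         if hi <= lo:
--             return 0
--         if hi - lo == 1:
--             return (v1[lo] & v2[lo + n]) ^ (v1[lo + n] & v2[lo])
--         mid = (lo + hi) // 2
--         return xr(lo, mid) ^ xr(mid, hi)
--
--     return xr(0, n)
-- ===== Notes on version B (the rewrite author's own statement) =====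
-- stated objective: alternative
-- what changed: B replaces A's two sliced zip-loops with an XOR accumulator by a recursive divide-and-conquer reduction: a fused per-index term (v1[i]&v2[i+n])^(v1[i+n]&v2[i]) is XOR-reduced over [0,n) by halving the index range (a balanced reduction tree, no slices, no accumulator), correct because XOR is associative with identity 0.
import Mathlib
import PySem

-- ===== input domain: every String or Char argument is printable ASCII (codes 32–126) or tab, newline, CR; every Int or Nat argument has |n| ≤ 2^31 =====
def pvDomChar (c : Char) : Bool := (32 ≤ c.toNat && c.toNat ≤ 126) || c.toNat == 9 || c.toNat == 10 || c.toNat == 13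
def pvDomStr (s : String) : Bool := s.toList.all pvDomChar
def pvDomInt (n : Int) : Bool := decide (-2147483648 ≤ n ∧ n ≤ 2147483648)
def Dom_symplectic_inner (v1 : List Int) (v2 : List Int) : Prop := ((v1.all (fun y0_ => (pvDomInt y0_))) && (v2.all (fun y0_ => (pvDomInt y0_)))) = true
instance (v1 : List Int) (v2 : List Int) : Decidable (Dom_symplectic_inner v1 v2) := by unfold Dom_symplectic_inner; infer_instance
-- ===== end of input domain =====

-- B replaces A's two sliced zip-loops with a recursive divide-and-conquer XOR reduction of a fused per-index term; same O(n) cost.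


-- ===== PORT A =====
def symplectic_inner (v1 : List Int) (v2 : List Int) : Int :=
  let n2 := v1.length
  if v2.length ≠ n2 ∨ n2 % 2 ≠ 0 then 0  -- Python raises ValueError here; excluded by Pre_
  else
    let n : Nat := n2 / 2                -- Python n2 // 2; n2 is a nonnegative length so Nat division is exact
    let x1 := PySem.List.slice v1 none (some (n : Int))
    let z1 := PySem.List.slice v1 (some (n : Int)) none
    let x2 := PySem.List.slice v2 none (some (n : Int))
    let z2 := PySem.List.slice v2 (some (n : Int)) none
    let s := (List.zip x1 z2).foldl (fun s ab => PySem.Int.bxor s (PySem.Int.band ab.1 ab.2)) 0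
    (List.zip z1 x2).foldl (fun s ab => PySem.Int.bxor s (PySem.Int.band ab.1 ab.2)) s

-- ===== PORT B =====
-- B's inner recursion xr: XOR-reduce the fused per-index terms over [lo, hi) by halving the range.
-- Python's indices lo, hi, lo+n are nonnegative in-range ints here, carried as Nat; v[i] is PySem.List.pyGetD (in range under Pre_).
def pvXrB (v1 : List Int) (v2 : List Int) (n : Nat) (lo : Nat) (hi : Nat) : Int :=
  if hi ≤ lo then 0
  else if hi - lo = 1 then
    PySem.Int.bxor
      (PySem.Int.band (PySem.List.pyGetD v1 (lo : Int) 0) (PySem.List.pyGetD v2 ((lo + n : Nat) : Int) 0))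
      (PySem.Int.band (PySem.List.pyGetD v1 ((lo + n : Nat) : Int) 0) (PySem.List.pyGetD v2 (lo : Int) 0))
  else
    let mid := (lo + hi) / 2
    PySem.Int.bxor (pvXrB v1 v2 n lo mid) (pvXrB v1 v2 n mid hi)
termination_by hi - lo
decreasing_by all_goals (simp_all; omega)

def symplectic_inner_alt (v1 : List Int) (v2 : List Int) : Int :=
  let n2 := v1.length
  if v2.length ≠ n2 ∨ n2 % 2 ≠ 0 then 0  -- Python raises ValueError here; excluded by Pre_
  else
    let n : Nat := n2 / 2
    pvXrB v1 v2 n 0 n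

-- ===== PRECONDITION & SPEC =====
-- Pre_ excludes exactly the inputs on which A raises ValueError: mismatched lengths or odd length.
def Pre_symplectic_inner (v1 : List Int) (v2 : List Int) : Prop :=
  v2.length = v1.length ∧ v1.length % 2 = 0
instance (v1 : List Int) (v2 : List Int) : Decidable (Pre_symplectic_inner v1 v2) := by
  unfold Pre_symplectic_inner; infer_instance
def pvWitness_symplectic_inner : List Int × List Int := ([1, 0, 1, 1], [0, 1, 1, 0])

def Spec_symplectic_inner (v1 : List Int) (v2 : List Int) (out : Int) : Prop := out = symplectic_inner_alt v1 v2
instance (v1 : List Int) (v2 : List Int) (out : Int) : Decidable (Spec_symplectic_inner v1 v2 out) := by unfold Spec_symplectic_inner; infer_instance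

-- ===== CLAIM (what is proved, stated in full; the proofs are below) =====
def Claim_equal_symplectic_inner : Prop := ∀ (v1 : List Int) (v2 : List Int), Dom_symplectic_inner v1 v2 → Pre_symplectic_inner v1 v2 → Spec_symplectic_inner v1 v2 (symplectic_inner v1 v2)

-- ===== LEMMAS AND PROOFS =====

-- bxor on negSucc/ofNat constructors, to get associativity from Nat.xor_assoc
theorem pv_bx1 (m n : Nat) : PySem.Int.bxor (Int.ofNat m) (Int.ofNat n) = Int.ofNat (m ^^^ n) := by
  simp [PySem.Int.bxor]
theorem pv_bx2 (m n : Nat) : PySem.Int.bxor (Int.ofNat m) (Int.negSucc n) = Int.negSucc (m ^^^ n) := by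
  simp [PySem.Int.bxor, Int.negSucc_eq]; omega
theorem pv_bx3 (m n : Nat) : PySem.Int.bxor (Int.negSucc m) (Int.ofNat n) = Int.negSucc (m ^^^ n) := by
  simp [PySem.Int.bxor, Int.negSucc_eq]; omega
theorem pv_bx4 (m n : Nat) : PySem.Int.bxor (Int.negSucc m) (Int.negSucc n) = Int.ofNat (m ^^^ n) := by
  have h1 : ¬ (0:Int) ≤ Int.negSucc m := by omega
  have h2 : ¬ (0:Int) ≤ Int.negSucc n := by omega
  simp [PySem.Int.bxor, h1, h2]

theorem pv_bxor_assoc (a b c : Int) :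
    PySem.Int.bxor (PySem.Int.bxor a b) c = PySem.Int.bxor a (PySem.Int.bxor b c) := by
  cases a <;> cases b <;> cases c <;> simp only [pv_bx1, pv_bx2, pv_bx3, pv_bx4, Nat.xor_assoc]

theorem pv_zero_bxor (a : Int) : PySem.Int.bxor 0 a = a := by
  rw [PySem.Int.bxor_comm, PySem.Int.bxor_zero]

theorem pv_bxor_four (a b c d : Int) :
    PySem.Int.bxor (PySem.Int.bxor a b) (PySem.Int.bxor c d)
      = PySem.Int.bxor (PySem.Int.bxor a c) (PySem.Int.bxor b d) := by
  rw [pv_bxor_assoc, pv_bxor_assoc, ← pv_bxor_assoc b c d, ← pv_bxor_assoc c b d,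
      PySem.Int.bxor_comm b c]

-- hoisting the initial accumulator out of an xor-fold
theorem pv_foldl_hoist {α : Type} (f : α → Int) (l : List α) (s : Int) :
    l.foldl (fun s x => PySem.Int.bxor s (f x)) s
      = PySem.Int.bxor s (l.foldl (fun s x => PySem.Int.bxor s (f x)) 0) := by
  induction l generalizing s with
  | nil => simp [PySem.Int.bxor_zero]
  | cons a l ih =>
    simp only [List.foldl_cons]
    rw [ih (PySem.Int.bxor s (f a)), ih (PySem.Int.bxor 0 (f a)), pv_zero_bxor, pv_bxor_assoc]

-- the xor-fold of per-index terms over a range, and its split law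
def pvX (t : Nat → Int) (lo hi : Nat) : Int :=
  (List.range' lo (hi - lo)).foldl (fun s k => PySem.Int.bxor s (t k)) 0

theorem pvX_split (t : Nat → Int) (lo mid hi : Nat) (h1 : lo ≤ mid) (h2 : mid ≤ hi) :
    pvX t lo hi = PySem.Int.bxor (pvX t lo mid) (pvX t mid hi) := by
  unfold pvX
  have hr : List.range' lo (hi - lo) = List.range' lo (mid - lo) ++ List.range' mid (hi - mid) := by
    have h := @List.range'_append lo (mid - lo) (hi - mid) 1
    simp only [one_mul] at h
    rw [show lo + (mid - lo) = mid from by omega,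
        show mid - lo + (hi - mid) = hi - lo from by omega] at h
    exact h.symm
  rw [hr, List.foldl_append, pv_foldl_hoist]

-- B's recursion computes the range xor-fold of its fused term
theorem pvXrB_eq_pvX (v1 v2 : List Int) (n lo hi : Nat) :
    pvXrB v1 v2 n lo hi
      = pvX (fun k => PySem.Int.bxor
          (PySem.Int.band (v1.getD k 0) (v2.getD (k + n) 0))
          (PySem.Int.band (v1.getD (k + n) 0) (v2.getD k 0))) lo hi := by
  generalize hfuel : hi - lo = fuel
  induction fuel using Nat.strong_induction_on generalizing lo hi with
  | _ fuel ih =>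
    rw [pvXrB]
    by_cases hle : hi ≤ lo
    · simp only [hle, if_true]
      unfold pvX
      have : hi - lo = 0 := by omega
      simp [this]
    · simp only [hle, if_false]
      by_cases hone : hi - lo = 1
      · simp only [hone, if_true]
        unfold pvX
        rw [hone, List.range'_one, List.foldl_cons, List.foldl_nil,
            PySem.List.pyGetD_natCast, PySem.List.pyGetD_natCast,
            PySem.List.pyGetD_natCast, PySem.List.pyGetD_natCast, pv_zero_bxor]
      · simp only [hone, if_false]
        have hmid1 : lo < (lo + hi) / 2 := by omega
        have hmid2 : (lo + hi) / 2 < hi := by omega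
        rw [ih ((lo + hi) / 2 - lo) (by omega) lo ((lo + hi) / 2) rfl,
            ih (hi - (lo + hi) / 2) (by omega) ((lo + hi) / 2) hi rfl,
            ← pvX_split _ lo ((lo + hi) / 2) hi (by omega) (by omega)]

-- a zipped pair of slices, written as a mapped index range
theorem pv_zip_take_drop (v1 v2 : List Int) (n : Nat)
    (h1 : n ≤ v1.length) (h2 : v2.length = n + n) :
    List.zip (v1.take n) (v2.drop n)
      = (List.range n).map (fun k => (v1.getD k 0, v2.getD (k + n) 0)) := by
  apply List.ext_getElem
  · simp; omega
  · intro k hk hk'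
    have hkn : k < n := by simpa using hk'
    have hkv1 : k < v1.length := by omega
    have hkv2 : n + k < v2.length := by omega
    simp [List.getElem_zip, List.getElem_take, List.getElem_drop,
          List.getD_eq_getElem?_getD, hkv1]
    rw [show k + n = n + k from by omega]
    simp [hkv2]

theorem pv_zip_drop_take (v1 v2 : List Int) (n : Nat)
    (h1 : v1.length = n + n) (h2 : n ≤ v2.length) :
    List.zip (v1.drop n) (v2.take n)
      = (List.range n).map (fun k => (v1.getD (k + n) 0, v2.getD k 0)) := by
  apply List.ext_getElem
  · simp; omega
  · intro k hk hk'
    have hkn : k < n := by simpa using hk'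
    have hkv1 : n + k < v1.length := by omega
    have hkv2 : k < v2.length := by omega
    simp [List.getElem_zip, List.getElem_take, List.getElem_drop,
          List.getD_eq_getElem?_getD, hkv2]
    rw [show k + n = n + k from by omega]
    simp [hkv1]

-- xor-fold distributes over a pointwise bxor of term functions
theorem pv_fold_bxor_split (f g : Nat → Int) (n : Nat) :
    (List.range n).foldl (fun s k => PySem.Int.bxor s (PySem.Int.bxor (f k) (g k))) 0
      = PySem.Int.bxor ((List.range n).foldl (fun s k => PySem.Int.bxor s (f k)) 0)
                       ((List.range n).foldl (fun s k => PySem.Int.bxor s (g k)) 0) := by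
  induction n with
  | zero => simp
  | succ n ih =>
    rw [List.range_succ]
    simp only [List.foldl_append, List.foldl_cons, List.foldl_nil]
    rw [ih, pv_bxor_four]

-- ===== VERDICT (by name: the statement is the Claim_ definition above) =====
theorem symplectic_inner_spec : Claim_equal_symplectic_inner := by
  intro v1 v2 _ hpre
  obtain ⟨hlen, heven⟩ := hpre
  unfold Spec_symplectic_inner symplectic_inner symplectic_inner_alt
  simp only [hlen, heven, ne_eq, or_self]
  set n := v1.length / 2 with hn
  have hn2 : v1.length = n + n := by omega
  have hv2 : v2.length = n + n := by omega
  rw [PySem.List.slice_to_natCast, PySem.List.slice_from_natCast,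
      PySem.List.slice_to_natCast, PySem.List.slice_from_natCast,
      pv_zip_take_drop v1 v2 n (by omega) hv2,
      pv_zip_drop_take v1 v2 n hn2 (by omega),
      List.foldl_map, List.foldl_map, pv_foldl_hoist, ← pv_fold_bxor_split,
      pvXrB_eq_pvX]
  unfold pvX
  rw [Nat.sub_zero, ← List.range_eq_range']
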